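-- pv_equiv track=rewrite | github.com/vinaymohndass68/numbers | doubleprime.py | double_prime_numbers
-- ===== SOURCE A (Python) =====
-- def is_prime(n):
--     """Check if a number is prime."""
--     if n <= 1:
--         return False
--     for i in range(2, int(n**0.5) + 1):
--         if n % i == 0:
--             return False
--     return True
--
-- def count_primes_up_to(n):
--     """Count the number of prime numbers from 1 to n (inclusive)."""
--     count = 0
--     for num in range(2, n + 1):
--         if is_prime(num):
--             count += 1
--     return count
--
-- def double_prime_numbers(limit):
--     """Find all double prime numbers up to a specified limit."""
--     double_primes = []
--     for n in range(2, limit + 1):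
--         # Only check for prime numbers (N itself must be prime)
--         if is_prime(n):
--             prime_count = count_primes_up_to(n)
--             # Check if the count of primes is also prime
--             if is_prime(prime_count):
--                 double_primes.append(n)
--
--     return double_primes
-- ===== SOURCE B (Python) =====
-- def double_prime_numbers(limit):
--     """Find all double prime numbers up to a specified limit.
--
--     One pass with a running prime-rank counter: instead of recounting all the
--     primes below every prime n (A's nested count_primes_up_to pass), keep the
--     count of primes seen so far while scanning 2..limit once.
--     """
--     def is_prime(n):
--         if n <= 1:
--             return False
--         return all(n % i for i in range(2, int(n**0.5) + 1))
--
--     rank = 0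
--     double_primes = []
--     for n in range(2, limit + 1):
--         if is_prime(n):
--             rank += 1
--             if is_prime(rank):
--                 double_primes.append(n)
--     return double_primes
-- ===== Notes on version B (the rewrite author's own statement) =====
-- stated objective: faster
-- what changed: B replaces A's per-prime recount (count_primes_up_to called again for every prime) by a single pass over 2..limit that maintains a running prime-rank counter, turning the nested counting loop into one pass.
import Mathlib
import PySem

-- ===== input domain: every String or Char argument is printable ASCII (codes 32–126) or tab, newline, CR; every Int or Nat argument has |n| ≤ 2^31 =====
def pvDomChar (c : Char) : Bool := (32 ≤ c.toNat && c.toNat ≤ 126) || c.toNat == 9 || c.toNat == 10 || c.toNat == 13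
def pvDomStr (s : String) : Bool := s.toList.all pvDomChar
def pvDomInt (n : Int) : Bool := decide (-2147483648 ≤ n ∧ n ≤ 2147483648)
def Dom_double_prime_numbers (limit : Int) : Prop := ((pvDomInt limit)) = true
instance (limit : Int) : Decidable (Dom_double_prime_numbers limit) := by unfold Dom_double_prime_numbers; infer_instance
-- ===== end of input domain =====

-- B replaces A's per-prime recount by one pass with a running prime-rank counter (asymptotically faster).

-- ===== PORT A =====
-- A's trial-division loop with early `return False`, transcribed as structural recursion.
def pvTrial (n : Int) : List Int → Bool
  | [] => true
  | i :: rest => if PySem.Int.mod n i == 0 then false else pvTrial n rest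

-- `int(n**0.5)` ported as Nat.sqrt (exact for 0 ≤ n ≤ 2^31, where double sqrt rounds correctly).
def is_prime (n : Int) : Bool :=
  if n ≤ 1 then false
  else pvTrial n (PySem.List.pyRange 2 ((Nat.sqrt n.toNat : Int) + 1) 1)

def count_primes_up_to (n : Int) : Int :=
  (PySem.List.pyRange 2 (n + 1) 1).foldl (fun count num => if is_prime num then count + 1 else count) 0

def pvStepA (acc : List Int) (n : Int) : List Int :=
  if is_prime n then
    (if is_prime (count_primes_up_to n) then acc ++ [n] else acc)
  else acc

def double_prime_numbers (limit : Int) : List Int :=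
  (PySem.List.pyRange 2 (limit + 1) 1).foldl pvStepA []

-- ===== PORT B =====
-- B's `all(n % i for i in ...)` primality test.
def is_prime_alt (n : Int) : Bool :=
  if n ≤ 1 then false
  else (PySem.List.pyRange 2 ((Nat.sqrt n.toNat : Int) + 1) 1).all (fun i => !(PySem.Int.mod n i == 0))

-- state = (rank, double_primes)
def pvStepB (st : Int × List Int) (n : Int) : Int × List Int :=
  if is_prime_alt n then
    (st.1 + 1, if is_prime_alt (st.1 + 1) then st.2 ++ [n] else st.2)
  else st

def double_prime_numbers_alt (limit : Int) : List Int :=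
  ((PySem.List.pyRange 2 (limit + 1) 1).foldl pvStepB ((0 : Int), ([] : List Int))).2

-- ===== PRECONDITION & SPEC =====
def Spec_double_prime_numbers (limit : Int) (out : List Int) : Prop := out = double_prime_numbers_alt limit
instance (limit : Int) (out : List Int) : Decidable (Spec_double_prime_numbers limit out) := by unfold Spec_double_prime_numbers; infer_instance

-- ===== CLAIM (what is proved, stated in full; the proofs are below) =====
def Claim_equal_double_prime_numbers : Prop := ∀ (limit : Int), Dom_double_prime_numbers limit → Spec_double_prime_numbers limit (double_prime_numbers limit)

-- ===== LEMMAS AND PROOFS =====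

theorem pvTrial_eq_all (n : Int) (l : List Int) :
    pvTrial n l = l.all (fun i => !(PySem.Int.mod n i == 0)) := by
  induction l with
  | nil => rfl
  | cons i rest ih =>
    simp only [pvTrial, List.all_cons]
    by_cases h : PySem.Int.mod n i == 0 <;> simp [h, ih]

theorem is_prime_alt_eq (n : Int) : is_prime_alt n = is_prime n := by
  unfold is_prime is_prime_alt
  by_cases h : n ≤ 1 <;> simp [h, pvTrial_eq_all]

-- count over range 2..(m+1) extended by one element
theorem count_succ (m : Int) (hm : 1 ≤ m) :
    count_primes_up_to (m + 1)
      = (if is_prime (m + 1) then count_primes_up_to m + 1 else count_primes_up_to m) := by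
  unfold count_primes_up_to
  rw [PySem.List.pyRange_one_succ_right (by omega : (2:Int) ≤ m + 1)]
  rw [List.foldl_append]
  simp

theorem dpn_succ (m : Int) (hm : 1 ≤ m) :
    double_prime_numbers (m + 1) = pvStepA (double_prime_numbers m) (m + 1) := by
  unfold double_prime_numbers
  rw [PySem.List.pyRange_one_succ_right (by omega : (2:Int) ≤ m + 1)]
  rw [List.foldl_append]
  simp

-- Main invariant: B's fold state after scanning 2..m is (count_primes_up_to m, double_prime_numbers m).
theorem pv_invariant : ∀ (k : Nat),
    (PySem.List.pyRange 2 ((k : Int) + 1 + 1) 1).foldl pvStepB ((0 : Int), ([] : List Int))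
      = (count_primes_up_to ((k : Int) + 1), double_prime_numbers ((k : Int) + 1)) := by
  intro k
  induction k with
  | zero =>
    simp only [Nat.cast_zero, zero_add]
    rw [PySem.List.pyRange_one_eq_nil (by norm_num)]
    unfold count_primes_up_to double_prime_numbers
    rw [PySem.List.pyRange_one_eq_nil (by norm_num)]
    rfl
  | succ k ih =>
    have h1 : ((k + 1 : Nat) : Int) + 1 + 1 = ((k : Int) + 1 + 1) + 1 := by push_cast; ring
    have hm : (1 : Int) ≤ (k : Int) + 1 := by omega
    rw [h1, PySem.List.pyRange_one_succ_right (by omega : (2:Int) ≤ (k : Int) + 1 + 1)]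
    rw [List.foldl_append, ih]
    have h2 : ((k + 1 : Nat) : Int) + 1 = ((k : Int) + 1) + 1 := by push_cast; ring
    rw [h2, count_succ _ hm, dpn_succ _ hm]
    simp only [List.foldl_cons, List.foldl_nil, pvStepB, pvStepA, is_prime_alt_eq]
    by_cases hp : is_prime ((k : Int) + 1 + 1) <;>
      simp [hp, count_succ _ hm]

theorem double_prime_numbers_eq (limit : Int) :
    double_prime_numbers limit = double_prime_numbers_alt limit := by
  by_cases h : limit ≤ 1
  · unfold double_prime_numbers double_prime_numbers_alt
    rw [PySem.List.pyRange_one_eq_nil (by omega)]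
    rfl
  · have hl : limit = ((limit - 1).toNat : Int) + 1 := by omega
    unfold double_prime_numbers_alt
    rw [hl, pv_invariant]

-- ===== VERDICT (by name: the statement is the Claim_ definition above) =====
theorem double_prime_numbers_spec : Claim_equal_double_prime_numbers := by
  intro limit _
  unfold Spec_double_prime_numbers
  exact double_prime_numbers_eq limit
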